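-- pv_equiv track=rewrite | github.com/keeshmariesh/PythonExploration | Challenges/Grid-Iron-Tactics/grid_iron_tactics.py | set_field
-- ===== SOURCE A (Python) =====
-- def set_field(position: int) -> list:
--     """Set the field with the football at the position marked by 'X'."""
--     field_width = 20
--     total_segments = 101
--     border_segment = "+----" * field_width + "+"
--     # Top boundary
--     field = [border_segment]
--
--     # Field segments
--     field_segment = ""
--     for i in range(total_segments):
--         char = "*"
--         if i == position:
--             char = "X"
--         elif i % 5 == 0:
--             char = "|"
--
--         field_segment += char
--
--     field.append(field_segment)
--     field.append(border_segment)
--     return field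
-- ===== SOURCE B (Python) =====
-- def set_field(position: int) -> list:
--     """Set the field with the football at the position marked by 'X'."""
--     border = "+----" * 20 + "+"
--     base = ("|****" * 21)[:101]          # '|' at every multiple of 5, '*' elsewhere
--     if 0 <= position < 101:
--         row = base[:position] + "X" + base[position + 1:]
--     else:
--         row = base
--     return [border, row, border]
-- ===== Notes on version B (the rewrite author's own statement) =====
-- stated objective: simpler
-- what changed: Replaces A's per-cell loop with if/elif branches by a closed-form base row built from a repeated pattern string sliced to field length, plus a single bounds-guarded slice substitution of the 'X'.
import Mathlib
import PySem

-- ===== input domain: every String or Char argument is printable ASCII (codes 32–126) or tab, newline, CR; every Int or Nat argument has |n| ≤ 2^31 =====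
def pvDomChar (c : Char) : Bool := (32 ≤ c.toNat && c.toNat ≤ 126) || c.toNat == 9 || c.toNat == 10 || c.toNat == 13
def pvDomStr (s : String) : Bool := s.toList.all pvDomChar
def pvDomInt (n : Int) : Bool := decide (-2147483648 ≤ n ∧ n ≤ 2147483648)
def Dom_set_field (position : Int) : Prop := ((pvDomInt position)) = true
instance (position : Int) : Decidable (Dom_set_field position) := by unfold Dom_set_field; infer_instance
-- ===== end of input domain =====

-- B builds the middle row by a closed form ('|****'*21)[:101] and one bounds-guarded
-- slice substitution of 'X' instead of A's per-character loop; objective: simpler.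

-- ===== PORT A =====
def set_field (position : Int) : List String :=
  [String.ofList (PySem.List.pyRepeat "+----".toList 20 ++ "+".toList),
   String.ofList ((PySem.List.pyRange 0 101 1).foldl
     (fun acc i =>
       acc ++ [if i = position then 'X'
               else if PySem.Int.mod i 5 = 0 then '|' else '*']) []),
   String.ofList (PySem.List.pyRepeat "+----".toList 20 ++ "+".toList)]

-- ===== PORT B =====
def altBase : List Char := PySem.List.slice (PySem.List.pyRepeat "|****".toList 21) none (some 101)

def set_field_alt (position : Int) : List String :=
  [String.ofList (PySem.List.pyRepeat "+----".toList 20 ++ "+".toList),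
   String.ofList (if 0 ≤ position ∧ position < 101 then
       PySem.List.slice altBase none (some position) ++ "X".toList
         ++ PySem.List.slice altBase (some (position + 1)) none
     else altBase),
   String.ofList (PySem.List.pyRepeat "+----".toList 20 ++ "+".toList)]

-- ===== PRECONDITION & SPEC =====
def Spec_set_field (position : Int) (out : List String) : Prop := out = set_field_alt position
instance (position : Int) (out : List String) : Decidable (Spec_set_field position out) := by unfold Spec_set_field; infer_instance

-- ===== CLAIM (what is proved, stated in full; the proofs are below) =====
def Claim_equal_set_field : Prop := ∀ (position : Int), Dom_set_field position → Spec_set_field position (set_field position)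

-- ===== LEMMAS AND PROOFS =====

-- the loop body written as a cell function
def cellA (position i : Int) : Char :=
  if i = position then 'X' else if PySem.Int.mod i 5 = 0 then '|' else '*'

def cellBase (i : Int) : Char := if PySem.Int.mod i 5 = 0 then '|' else '*'

theorem rowA_eq_map (p : Int) :
    (PySem.List.pyRange 0 101 1).foldl
      (fun acc i => acc ++ [if i = p then 'X'
        else if PySem.Int.mod i 5 = 0 then '|' else '*']) []
      = (PySem.List.pyRange 0 101 1).map (cellA p) := by
  rw [PySem.List.foldl_append_singleton_eq_map]
  rfl

theorem base_eq_map : altBase = (PySem.List.pyRange 0 101 1).map cellBase := by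
  decide

theorem map_cellA_eq_base (p : Int) (l : List Int) (h : p ∉ l) :
    l.map (cellA p) = l.map cellBase := by
  apply List.map_congr_left
  intro x hx
  have hne : ¬ (x = p) := fun he => h (he ▸ hx)
  simp [cellA, cellBase, hne]

theorem set_field_out_of_range (p : Int) (h : p < 0 ∨ 101 ≤ p) :
    set_field p = set_field_alt p := by
  unfold set_field set_field_alt
  rw [rowA_eq_map, if_neg (by omega),
      map_cellA_eq_base p _ (by rw [PySem.List.mem_pyRange_one]; omega),
      ← base_eq_map]

theorem set_field_in_range (p : Int) (h0 : 0 ≤ p) (h1 : p < 101) :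
    set_field p = set_field_alt p := by
  unfold set_field set_field_alt
  rw [rowA_eq_map, if_pos ⟨h0, h1⟩,
      PySem.List.slice_to altBase h0,
      PySem.List.slice_from altBase (by omega : (0:Int) ≤ p + 1)]
  have hsplit1 : PySem.List.pyRange 0 101 1
      = PySem.List.pyRange 0 p 1 ++ (PySem.List.pyRange p (p+1) 1 ++ PySem.List.pyRange (p+1) 101 1) := by
    rw [← PySem.List.pyRange_one_append p (p+1) 101 (by omega) (by omega),
        ← PySem.List.pyRange_one_append 0 p 101 h0 (by omega)]
  have hsing : PySem.List.pyRange p (p+1) 1 = [p] := PySem.List.pyRange_one_singleton p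
  have hlen1 : ((PySem.List.pyRange 0 p 1).map cellBase).length = p.toNat := by
    rw [List.length_map, PySem.List.length_pyRange_one]; omega
  have hsplit2 : PySem.List.pyRange 0 101 1
      = PySem.List.pyRange 0 (p+1) 1 ++ PySem.List.pyRange (p+1) 101 1 :=
    PySem.List.pyRange_one_append 0 (p+1) 101 (by omega) (by omega)
  have hlen2 : ((PySem.List.pyRange 0 (p+1) 1).map cellBase).length = (p+1).toNat := by
    rw [List.length_map, PySem.List.length_pyRange_one]; omega
  have htake : altBase.take p.toNat = (PySem.List.pyRange 0 p 1).map cellBase := by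
    rw [base_eq_map, hsplit1, List.map_append, List.take_left' hlen1]
  have hdrop : altBase.drop (p+1).toNat = (PySem.List.pyRange (p+1) 101 1).map cellBase := by
    rw [base_eq_map, hsplit2, List.map_append, List.drop_left' hlen2]
  rw [htake, hdrop, hsplit1, List.map_append, List.map_append, hsing]
  have hmid : ([p].map (cellA p)) = ['X'] := by simp [cellA]
  rw [hmid, map_cellA_eq_base p (PySem.List.pyRange 0 p 1)
        (by rw [PySem.List.mem_pyRange_one]; omega),
      map_cellA_eq_base p (PySem.List.pyRange (p+1) 101 1)
        (by rw [PySem.List.mem_pyRange_one]; omega)]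
  simp

-- ===== VERDICT (by name: the statement is the Claim_ definition above) =====
theorem set_field_spec : Claim_equal_set_field := by
  intro p _
  unfold Spec_set_field
  by_cases h : 0 ≤ p ∧ p < 101
  · exact set_field_in_range p h.1 h.2
  · exact set_field_out_of_range p (by omega)
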